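-- pv_equiv track=rewrite | github.com/Doofen-bit/Fuzzy-Rabbits-Safe-Restaurant-Finder | src/dietary.py | classify_dietary
-- ===== SOURCE A (Python) =====
-- from typing import Dict, List
--
-- _NON_VEGAN = {
--     "meat", "beef", "chicken", "pork", "lamb", "turkey", "shrimp", "salmon",
--     "fish", "tuna", "anchovy", "anchovies", "eggs", "egg", "milk", "cream",
--     "butter", "cheese", "parmesan", "feta", "mozzarella", "yogurt",
--     "heavy cream", "sour cream", "whey", "honey", "gelatin", "lard",
--     "pancetta", "bacon", "prosciutto", "fish sauce",
-- }
--
-- _NON_KETO = {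
--     "sugar", "flour", "bread", "pasta", "spaghetti", "rice", "basmati rice",
--     "noodles", "potato", "sweet potato", "oats", "quinoa", "beans", "lentils",
--     "chickpeas", "corn", "tortillas", "pita", "flatbread", "sourdough",
--     "arborio rice", "tamarind paste", "mirin", "sake", "brown sugar",
--     "red lentils", "peas", "carrots",
-- }
--
-- _GLUTEN_INGREDIENTS = {
--     "flour", "bread", "pasta", "spaghetti", "wheat", "barley", "rye",
--     "sourdough", "pita", "flatbread", "soy sauce", "tortillas",
-- }
--
-- def classify_dietary(recipe: Dict) -> Dict[str, bool]:
--     """Return a dict of dietary flags for *recipe*.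
--
--     Returns
--     -------
--     dict with keys ``vegan``, ``keto``, ``gluten_free``.
--     """
--     ingredients_lower = {i.lower() for i in recipe.get("ingredients", [])}
--     existing_tags = {t.lower() for t in recipe.get("tags", [])}
--
--     def _matches(ingredient_set: set, keywords: set) -> bool:
--         """Return True if any ingredient contains or is contained by a keyword."""
--         for ing in ingredient_set:
--             for kw in keywords:
--                 if kw in ing or ing in kw:
--                     return True
--         return False
--
--     # Vegan: no animal products in ingredients
--     is_vegan = "vegan" in existing_tags or not _matches(ingredients_lower, _NON_VEGAN)
--
--     # Keto: low carb – no high-carb ingredients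
--     is_keto = "keto" in existing_tags or not _matches(ingredients_lower, _NON_KETO)
--
--     # Gluten-free: no gluten-containing ingredients
--     has_gluten = _matches(ingredients_lower, _GLUTEN_INGREDIENTS)
--     is_gluten_free = "gluten-free" in existing_tags or not has_gluten
--
--     return {"vegan": is_vegan, "keto": is_keto, "gluten_free": is_gluten_free}
-- ===== SOURCE B (Python) =====
-- _NON_VEGAN = (
--     "meat", "beef", "chicken", "pork", "lamb", "turkey", "shrimp", "salmon",
--     "fish", "tuna", "anchovy", "anchovies", "eggs", "egg", "milk", "cream",
--     "butter", "cheese", "parmesan", "feta", "mozzarella", "yogurt",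
--     "heavy cream", "sour cream", "whey", "honey", "gelatin", "lard",
--     "pancetta", "bacon", "prosciutto", "fish sauce",
-- )
--
-- _NON_KETO = (
--     "sugar", "flour", "bread", "pasta", "spaghetti", "rice", "basmati rice",
--     "noodles", "potato", "sweet potato", "oats", "quinoa", "beans", "lentils",
--     "chickpeas", "corn", "tortillas", "pita", "flatbread", "sourdough",
--     "arborio rice", "tamarind paste", "mirin", "sake", "brown sugar",
--     "red lentils", "peas", "carrots",
-- )
--
-- _GLUTEN_INGREDIENTS = (
--     "flour", "bread", "pasta", "spaghetti", "wheat", "barley", "rye",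
--     "sourdough", "pita", "flatbread", "soy sauce", "tortillas",
-- )
--
-- # One merged keyword table built once at import: keyword -> list of violated categories.
-- _KW = {}
-- for _cat, _kws in (("nonvegan", _NON_VEGAN), ("nonketo", _NON_KETO),
--                    ("gluten", _GLUTEN_INGREDIENTS)):
--     for _kw in _kws:
--         _KW.setdefault(_kw, []).append(_cat)
--
--
-- def classify_dietary(recipe):
--     """Loop over the merged keyword table (not over ingredients), collecting the
--     set of violated categories; then decode the three flags from that set."""
--     ings = [i.lower() for i in recipe.get("ingredients", [])]
--     hit = set()
--     for kw, cats in _KW.items():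
--         if any(kw in ing or ing in kw for ing in ings):
--             hit.update(cats)
--     tags = {t.lower() for t in recipe.get("tags", [])}
--     return {
--         "vegan": "vegan" in tags or "nonvegan" not in hit,
--         "keto": "keto" in tags or "nonketo" not in hit,
--         "gluten_free": "gluten-free" in tags or "gluten" not in hit,
--     }
-- ===== Notes on version B (the rewrite author's own statement) =====
-- stated objective: alternative
-- what changed: Replaces A's three separate _matches scans of the ingredient set (one per keyword set) with a single merged keyword->categories table built once; B loops over that table instead of over ingredients, collects the set of violated categories, and decodes the three flags from it.
import Mathlib
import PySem

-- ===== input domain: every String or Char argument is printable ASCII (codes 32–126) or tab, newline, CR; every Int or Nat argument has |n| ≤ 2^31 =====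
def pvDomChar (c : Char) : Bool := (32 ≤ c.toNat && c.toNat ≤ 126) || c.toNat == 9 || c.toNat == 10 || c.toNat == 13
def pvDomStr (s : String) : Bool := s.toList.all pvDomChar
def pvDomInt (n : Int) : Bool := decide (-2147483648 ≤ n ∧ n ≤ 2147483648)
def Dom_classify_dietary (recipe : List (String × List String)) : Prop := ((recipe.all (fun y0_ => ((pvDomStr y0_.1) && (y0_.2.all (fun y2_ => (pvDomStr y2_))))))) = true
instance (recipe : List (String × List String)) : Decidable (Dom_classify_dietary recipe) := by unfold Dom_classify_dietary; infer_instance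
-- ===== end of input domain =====

-- B replaces A's three separate _matches scans of the ingredient set by ONE merged
-- keyword->categories table built once; it loops over that table (not over ingredients),
-- collecting the set of violated categories, and decodes the three flags from that set.

-- keyword collections, shared verbatim by both programs
def pvNV : List String := ["meat", "beef", "chicken", "pork", "lamb", "turkey", "shrimp", "salmon", "fish", "tuna", "anchovy", "anchovies", "eggs", "egg", "milk", "cream", "butter", "cheese", "parmesan", "feta", "mozzarella", "yogurt", "heavy cream", "sour cream", "whey", "honey", "gelatin", "lard", "pancetta", "bacon", "prosciutto", "fish sauce"]
def pvNK : List String := ["sugar", "flour", "bread", "pasta", "spaghetti", "rice", "basmati rice", "noodles", "potato", "sweet potato", "oats", "quinoa", "beans", "lentils", "chickpeas", "corn", "tortillas", "pita", "flatbread", "sourdough", "arborio rice", "tamarind paste", "mirin", "sake", "brown sugar", "red lentils", "peas", "carrots"]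
def pvGL : List String := ["flour", "bread", "pasta", "spaghetti", "wheat", "barley", "rye", "sourdough", "pita", "flatbread", "soy sauce", "tortillas"]

-- ===== PORT A =====
-- 'kw in ing or ing in kw'
def pvKwTest (ing kw : String) : Bool := PySem.Str.isIn kw ing || PySem.Str.isIn ing kw

-- A's nested for-loops with early 'return True' (order-independent existential over the set)
def pvMatches (ingredient_set : PySem.Set String) (keywords : List String) : Bool :=
  ingredient_set.any (fun ing => keywords.any (fun kw => pvKwTest ing kw))

def classify_dietary (recipe : List (String × List String)) : List (String × Bool) :=
  let ingredients_lower : PySem.Set String :=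
    PySem.Set.ofList ((PySem.Dict.getD (PySem.Dict.mk recipe) "ingredients" []).map PySem.Str.lower)
  let existing_tags : PySem.Set String :=
    PySem.Set.ofList ((PySem.Dict.getD (PySem.Dict.mk recipe) "tags" []).map PySem.Str.lower)
  let is_vegan := PySem.Set.contains existing_tags "vegan" || !(pvMatches ingredients_lower pvNV)
  let is_keto := PySem.Set.contains existing_tags "keto" || !(pvMatches ingredients_lower pvNK)
  let has_gluten := pvMatches ingredients_lower pvGL
  let is_gluten_free := PySem.Set.contains existing_tags "gluten-free" || !has_gluten
  [("vegan", is_vegan), ("keto", is_keto), ("gluten_free", is_gluten_free)]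

-- ===== PORT B =====
-- B's module-level table build: _KW.setdefault(kw, []).append(cat)  =  modify kw [] (· ++ [cat])
def pvKW : PySem.Dict String (List String) :=
  ([("nonvegan", pvNV), ("nonketo", pvNK), ("gluten", pvGL)] : List (String × List String)).foldl
    (fun d p => p.2.foldl (fun d kw => d.modify kw [] (· ++ [p.1])) d) PySem.Dict.empty

def classify_dietary_alt (recipe : List (String × List String)) : List (String × Bool) :=
  let ings := (PySem.Dict.getD (PySem.Dict.mk recipe) "ingredients" []).map PySem.Str.lower
  let hit : PySem.Set String :=
    pvKW.items.foldl
      (fun (h : PySem.Set String) p =>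
        if ings.any (fun ing => PySem.Str.isIn p.1 ing || PySem.Str.isIn ing p.1)
        then PySem.Set.update h p.2 else h)
      PySem.Set.empty
  let tags : PySem.Set String := PySem.Set.ofList ((PySem.Dict.getD (PySem.Dict.mk recipe) "tags" []).map PySem.Str.lower)
  [("vegan", tags.contains "vegan" || !(hit.contains "nonvegan")),
   ("keto", tags.contains "keto" || !(hit.contains "nonketo")),
   ("gluten_free", tags.contains "gluten-free" || !(hit.contains "gluten"))]

-- ===== PRECONDITION & SPEC =====
def Spec_classify_dietary (recipe : List (String × List String)) (out : List (String × Bool)) : Prop := out = classify_dietary_alt recipe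
instance (recipe : List (String × List String)) (out : List (String × Bool)) : Decidable (Spec_classify_dietary recipe out) := by unfold Spec_classify_dietary; infer_instance

-- ===== CLAIM (what is proved, stated in full; the proofs are below) =====
def Claim_equal_classify_dietary : Prop := ∀ (recipe : List (String × List String)), Dom_classify_dietary recipe → Spec_classify_dietary recipe (classify_dietary recipe)

-- ===== LEMMAS AND PROOFS =====

-- B's fold over the keyword table: the hit set contains c iff some table entry matched and carries c
theorem pv_hit_fold (M : String → Bool) (ps : List (String × List String)) (h : PySem.Set String) (c : String) :
    (ps.foldl (fun (h : PySem.Set String) p => if M p.1 then PySem.Set.update h p.2 else h) h).contains c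
      = (h.contains c || ps.any (fun p => M p.1 && p.2.contains c)) := by
  induction ps generalizing h with
  | nil => simp only [List.foldl_nil, List.any_nil, Bool.or_false]
  | cons p ps ih =>
    simp only [List.foldl_cons, List.any_cons, ih]
    by_cases hm : M p.1 = true
    · simp [hm, Bool.or_assoc]
    · simp only [Bool.not_eq_true] at hm
      simp [hm]

-- B's concrete hit fold, through pv_hit_fold, starting from the empty set
theorem pv_hit_contains (ings : List String) (c : String) :
    (pvKW.items.foldl
        (fun (h : PySem.Set String) p =>
          if ings.any (fun ing => PySem.Str.isIn p.1 ing || PySem.Str.isIn ing p.1)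
          then PySem.Set.update h p.2 else h)
        PySem.Set.empty).contains c
      = pvKW.items.any (fun p =>
          (ings.any fun ing => PySem.Str.isIn p.1 ing || PySem.Str.isIn ing p.1) && p.2.contains c) := by
  rw [pv_hit_fold (fun kw => ings.any fun ing => PySem.Str.isIn kw ing || PySem.Str.isIn ing kw)]
  simp [PySem.Set.empty]

-- any with a conjoined filter
theorem pv_any_and_filter {α : Type} (L : List α) (f g : α → Bool) :
    L.any (fun p => f p && g p) = (L.filter g).any f := by
  induction L with
  | nil => rfl
  | cons x xs ih =>
    rcases hg : g x with _ | _ <;> simp [hg, ih]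

-- any is determined by membership
theorem pv_any_congr_mem {α : Type} (xs ys : List α) (M : α → Bool)
    (h1 : ∀ x ∈ xs, x ∈ ys) (h2 : ∀ x ∈ ys, x ∈ xs) : xs.any M = ys.any M := by
  rcases h : ys.any M with _ | _
  · rw [List.any_eq_false] at h ⊢
    exact fun x hx => h x (h1 x hx)
  · rw [List.any_eq_true] at h ⊢
    obtain ⟨x, hx, hp⟩ := h
    exact ⟨x, h2 x hx, hp⟩

-- swapping the two existential scans
theorem pv_any_comm {α β : Type} (xs : List α) (ys : List β) (f : α → β → Bool) :
    xs.any (fun a => ys.any (fun b => f a b)) = ys.any (fun b => xs.any (fun a => f a b)) := by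
  rw [Bool.eq_iff_iff]
  simp only [List.any_eq_true]
  constructor
  · rintro ⟨a, ha, b, hb, hf⟩; exact ⟨b, hb, a, ha, hf⟩
  · rintro ⟨b, hb, a, ha, hf⟩; exact ⟨a, ha, b, hb, hf⟩

-- any over a deduplicated set equals any over the underlying list
theorem pv_any_ofList {α : Type} [BEq α] [LawfulBEq α] (xs : List α) (p : α → Bool) :
    (PySem.Set.ofList xs).any p = xs.any p := by
  rcases h : xs.any p with _ | _
  · rw [List.any_eq_false] at h ⊢
    intro x hx
    exact h x (by simpa [PySem.Set.mem_ofList] using hx)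
  · rw [List.any_eq_true] at h ⊢
    obtain ⟨x, hx, hp⟩ := h
    exact ⟨x, by simpa [PySem.Set.mem_ofList] using hx, hp⟩

-- the table entries carrying category c are exactly that category's keyword list
theorem pv_cat_eq (M : String → Bool) (c : String) (kws : List String)
    (h1 : ∀ x ∈ (pvKW.items.filter (fun p => p.2.contains c)).map Prod.fst, x ∈ kws)
    (h2 : ∀ x ∈ kws, x ∈ (pvKW.items.filter (fun p => p.2.contains c)).map Prod.fst) :
    pvKW.items.any (fun p => M p.1 && p.2.contains c) = kws.any M := by
  rw [pv_any_and_filter]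
  have h3 : (pvKW.items.filter (fun p => p.2.contains c)).any (fun p => M p.1)
      = ((pvKW.items.filter (fun p => p.2.contains c)).map Prod.fst).any M := by
    rw [List.any_map]; rfl
  rw [h3]
  exact pv_any_congr_mem _ _ M h1 h2

-- A's _matches over the lowered ingredient set = B's per-keyword test, joined through the merged table
theorem pv_matches_cat (raws : List String) (c : String) (kws : List String)
    (h1 : ∀ x ∈ (pvKW.items.filter (fun p => p.2.contains c)).map Prod.fst, x ∈ kws)
    (h2 : ∀ x ∈ kws, x ∈ (pvKW.items.filter (fun p => p.2.contains c)).map Prod.fst) :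
    pvKW.items.any (fun p =>
        ((raws.map PySem.Str.lower).any fun ing => PySem.Str.isIn p.1 ing || PySem.Str.isIn ing p.1)
        && p.2.contains c)
      = pvMatches (PySem.Set.ofList (raws.map PySem.Str.lower)) kws := by
  unfold pvMatches
  rw [pv_any_ofList, pv_any_comm]
  exact pv_cat_eq (fun kw => (raws.map PySem.Str.lower).any fun ing => PySem.Str.isIn kw ing || PySem.Str.isIn ing kw) c kws h1 h2

-- ===== VERDICT (by name: the statement is the Claim_ definition above) =====
set_option maxRecDepth 4096 in
theorem classify_dietary_spec : Claim_equal_classify_dietary := by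
  intro recipe _
  unfold Spec_classify_dietary classify_dietary classify_dietary_alt
  simp only [pv_hit_contains]
  rw [pv_matches_cat _ "nonvegan" pvNV (by decide) (by decide),
      pv_matches_cat _ "nonketo" pvNK (by decide) (by decide),
      pv_matches_cat _ "gluten" pvGL (by decide) (by decide)]
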